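-- pv_equiv track=rewrite | github.com/jnzd/advent-of-code | aoc-2022/day09/day09.py | move_two
-- ===== SOURCE A (Python) =====
-- def touching(head, tail):
--     x1, y1 = head
--     x2, y2 = tail
--     return ((x1 == x2 and abs(y1 - y2) == 1) or
--             (y1 == y2 and abs(x1 - x2) == 1) or
--             (x1 == x2 and y1 == y2) or
--             (abs(x1 - x2) == 1 and abs(y1 - y2) == 1))
--
-- def adjust(head, tail):
--     xh, yh = head
--     xt, yt = tail
--     dx = xh - xt
--     dy = yh - yt
--     if dx == 0:
--         if   dy == 2:  yt += 1
--         elif dy == -2: yt -= 1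
--     elif dy == 0:
--         if   dx == 2:  xt += 1
--         elif dx == -2: xt -= 1
--     else:
--         if   dx > 0: xt += 1
--         elif dx < 0: xt -= 1
--         if   dy > 0: yt += 1
--         elif dy < 0: yt -= 1
--     return (xt, yt)
--
-- def move_two(knots, direction):
--     xh, yh = knots[0]
--     if direction == 'U':
--         yh += 1
--     elif direction == 'D':
--         yh -= 1
--     elif direction == 'R':
--         xh += 1
--     elif direction == 'L':
--         xh -= 1
--     knots[0] = (xh, yh)
--     for i in range(1, len(knots)):
--         if not touching(knots[i-1], knots[i]):
--             knots[i] = adjust(knots[i-1], knots[i])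
--     return knots
-- ===== SOURCE B (Python) =====
-- def _follow(p, rest):
--     if not rest:
--         return [p]
--     x, y = rest[0]
--     dx = p[0] - x
--     dy = p[1] - y
--     d2 = dx * dx + dy * dy
--     if d2 == 4 or (d2 > 4 and dx * dy != 0):
--         x += (dx > 0) - (dx < 0)
--         y += (dy > 0) - (dy < 0)
--     return [p] + _follow((x, y), rest[1:])
--
-- def move_two(knots, direction):
--     MOVES = {'U': (0, 1), 'D': (0, -1), 'R': (1, 0), 'L': (-1, 0)}
--     mx, my = MOVES.get(direction, (0, 0))
--     knots[:] = _follow((knots[0][0] + mx, knots[0][1] + my), knots[1:])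
--     return knots
-- ===== Notes on version B (the rewrite author's own statement) =====
-- stated objective: simpler
-- what changed: Replaces the touching()/adjust() helper pair (4-disjunct adjacency test plus nested per-axis case analysis) and the in-place index loop with a table-driven head dispatch (dict lookup instead of the if/elif chain) and a recursive _follow that rebuilds the rope, deciding each knot's move by one squared-Euclidean-distance test and sign arithmetic.
-- outside the precondition, e.g. on move_two([], 'U'): A raises IndexError, B raises IndexError
import Mathlib
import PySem

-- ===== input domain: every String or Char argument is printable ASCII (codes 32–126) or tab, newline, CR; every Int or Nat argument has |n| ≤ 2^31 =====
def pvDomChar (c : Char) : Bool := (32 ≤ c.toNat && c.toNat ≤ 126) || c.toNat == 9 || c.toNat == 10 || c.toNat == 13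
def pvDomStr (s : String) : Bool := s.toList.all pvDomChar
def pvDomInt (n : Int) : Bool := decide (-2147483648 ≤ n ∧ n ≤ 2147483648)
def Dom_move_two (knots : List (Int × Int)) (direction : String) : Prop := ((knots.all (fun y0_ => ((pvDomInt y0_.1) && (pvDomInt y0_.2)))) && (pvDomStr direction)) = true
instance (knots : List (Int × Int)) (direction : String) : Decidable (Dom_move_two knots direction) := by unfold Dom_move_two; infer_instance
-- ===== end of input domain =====

-- ===== PORT A =====
-- B replaces A's touching/adjust helper pair and in-place index loop with a table-driven head
-- dispatch and a recursive follow using a squared-distance test and sign arithmetic (return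
-- value proved equal; in Python both mutate `knots` to the same contents).
def pyAbs (v : Int) : Int := if v < 0 then -v else v

def touchingA (head tail : Int × Int) : Bool :=
  (head.1 == tail.1 && pyAbs (head.2 - tail.2) == 1) ||
  (head.2 == tail.2 && pyAbs (head.1 - tail.1) == 1) ||
  (head.1 == tail.1 && head.2 == tail.2) ||
  (pyAbs (head.1 - tail.1) == 1 && pyAbs (head.2 - tail.2) == 1)

def adjustA (head tail : Int × Int) : Int × Int :=
  let dx := head.1 - tail.1
  let dy := head.2 - tail.2
  if dx = 0 then
    (tail.1, if dy = 2 then tail.2 + 1 else if dy = -2 then tail.2 - 1 else tail.2)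
  else if dy = 0 then
    (if dx = 2 then tail.1 + 1 else if dx = -2 then tail.1 - 1 else tail.1, tail.2)
  else
    (if dx > 0 then tail.1 + 1 else if dx < 0 then tail.1 - 1 else tail.1,
     if dy > 0 then tail.2 + 1 else if dy < 0 then tail.2 - 1 else tail.2)

-- A's `for i in range(1, len(knots))` updating knots[i] in place: structural recursion
-- carrying the (already updated) previous knot.
def loopA (prev : Int × Int) : List (Int × Int) → List (Int × Int)
  | [] => []
  | t :: rest =>
    let t' := if touchingA prev t then t else adjustA prev t
    t' :: loopA t' rest

def move_two (knots : List (Int × Int)) (direction : String) : List (Int × Int) :=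
  match knots with
  | [] => []   -- Python raises IndexError here; excluded by Pre_move_two
  | (xh, yh) :: rest =>
    let h' :=
      if direction = "U" then (xh, yh + 1)
      else if direction = "D" then (xh, yh - 1)
      else if direction = "R" then (xh + 1, yh)
      else if direction = "L" then (xh - 1, yh)
      else (xh, yh)
    h' :: loopA h' rest

-- ===== PORT B =====
-- `return [p] + _follow((x, y), rest[1:])`: structural recursion building the list by cons.
def followB (p : Int × Int) : List (Int × Int) → List (Int × Int)
  | [] => [p]
  | (x, y) :: rest =>
    let dx := p.1 - x
    let dy := p.2 - y
    let d2 := dx * dx + dy * dy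
    let t' :=
      if d2 = 4 ∨ (d2 > 4 ∧ dx * dy ≠ 0) then
        (x + ((if dx > 0 then (1 : Int) else 0) - (if dx < 0 then (1 : Int) else 0)),
         y + ((if dy > 0 then (1 : Int) else 0) - (if dy < 0 then (1 : Int) else 0)))
      else (x, y)
    p :: followB t' rest

def movesB : PySem.Dict String (Int × Int) :=
  PySem.Dict.ofList [("U", (0, 1)), ("D", (0, -1)), ("R", (1, 0)), ("L", (-1, 0))]

def move_two_alt (knots : List (Int × Int)) (direction : String) : List (Int × Int) :=
  match knots with
  | [] => []   -- Python raises IndexError here; excluded by Pre_move_two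
  | (x0, y0) :: rest =>
    let m := movesB.getD direction (0, 0)
    followB (x0 + m.1, y0 + m.2) rest

-- ===== PRECONDITION & SPEC =====
-- Pre_ excludes only the empty list, on which A raises IndexError at knots[0].
def Pre_move_two (knots : List (Int × Int)) (direction : String) : Prop := knots ≠ []
instance (knots : List (Int × Int)) (direction : String) : Decidable (Pre_move_two knots direction) := by
  unfold Pre_move_two; infer_instance

def pvWitness_move_two : (List (Int × Int)) × String := ([(0, 0), (1, 2)], "U")

def Spec_move_two (knots : List (Int × Int)) (direction : String) (out : List (Int × Int)) : Prop := out = move_two_alt knots direction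
instance (knots : List (Int × Int)) (direction : String) (out : List (Int × Int)) : Decidable (Spec_move_two knots direction out) := by unfold Spec_move_two; infer_instance

-- ===== CLAIM (what is proved, stated in full; the proofs are below) =====
def Claim_equal_move_two : Prop := ∀ (knots : List (Int × Int)) (direction : String), Dom_move_two knots direction → Pre_move_two knots direction → Spec_move_two knots direction (move_two knots direction)

-- ===== LEMMAS AND PROOFS =====
-- B's squared-distance move condition, characterised linearly (so omega can finish the case split)
theorem cond_iff (dx dy : Int) :
    (dx * dx + dy * dy = 4 ∨ (dx * dx + dy * dy > 4 ∧ dx * dy ≠ 0)) ↔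
    ((dx ≠ 0 ∧ dy ≠ 0 ∧ (2 ≤ dx ∨ dx ≤ -2 ∨ 2 ≤ dy ∨ dy ≤ -2)) ∨
     (dx = 0 ∧ (dy = 2 ∨ dy = -2)) ∨ (dy = 0 ∧ (dx = 2 ∨ dx = -2))) := by
  constructor
  · rintro (h | ⟨h, hp⟩)
    · by_cases hx : dx = 0
      · subst hx; right; left; refine ⟨rfl, ?_⟩
        have h4 : (dy - 2) * (dy + 2) = 0 := by nlinarith
        rcases mul_eq_zero.mp h4 with h' | h' <;> omega
      · by_cases hy : dy = 0
        · subst hy; right; right; refine ⟨rfl, ?_⟩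
          have h4 : (dx - 2) * (dx + 2) = 0 := by nlinarith
          rcases mul_eq_zero.mp h4 with h' | h' <;> omega
        · left; refine ⟨hx, hy, ?_⟩
          by_contra hc
          have hx1 : dx = 1 ∨ dx = -1 := by omega
          have hy1 : dy = 1 ∨ dy = -1 := by omega
          rcases hx1 with h1 | h1 <;> rcases hy1 with h2 | h2 <;> subst h1 <;> subst h2 <;> simp_all
    · have hx : dx ≠ 0 := fun h0 => hp (by simp [h0])
      have hy : dy ≠ 0 := fun h0 => hp (by simp [h0])
      left; refine ⟨hx, hy, ?_⟩
      by_contra hc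
      have hx1 : dx = 1 ∨ dx = -1 := by omega
      have hy1 : dy = 1 ∨ dy = -1 := by omega
      rcases hx1 with h1 | h1 <;> rcases hy1 with h2 | h2 <;> subst h1 <;> subst h2 <;> simp_all
  · rintro (⟨hx, hy, hb⟩ | ⟨hx, hy⟩ | ⟨hy, hx⟩)
    · have hdx1 : 1 ≤ dx * dx := by rcases (by omega : 1 ≤ dx ∨ dx ≤ -1) with h | h <;> nlinarith
      have hdy1 : 1 ≤ dy * dy := by rcases (by omega : 1 ≤ dy ∨ dy ≤ -1) with h | h <;> nlinarith
      right
      refine ⟨?_, mul_ne_zero hx hy⟩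
      rcases hb with h | h | h | h <;> nlinarith
    · left; rcases hy with h | h <;> subst h <;> subst hx <;> ring
    · left; rcases hx with h | h <;> subst h <;> subst hy <;> ring

-- the per-knot steps agree: B's squared-distance/sign step equals A's touching/adjust step
set_option maxHeartbeats 1000000 in
theorem stepB_eq (p t : Int × Int) :
    (let dx := p.1 - t.1
     let dy := p.2 - t.2
     let d2 := dx * dx + dy * dy
     if d2 = 4 ∨ (d2 > 4 ∧ dx * dy ≠ 0) then
       (t.1 + ((if dx > 0 then (1 : Int) else 0) - (if dx < 0 then (1 : Int) else 0)),
        t.2 + ((if dy > 0 then (1 : Int) else 0) - (if dy < 0 then (1 : Int) else 0)))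
     else (t.1, t.2)) = if touchingA p t then t else adjustA p t := by
  obtain ⟨xh, yh⟩ := p
  obtain ⟨xt, yt⟩ := t
  simp only [touchingA, adjustA, pyAbs, Bool.or_eq_true, Bool.and_eq_true, beq_iff_eq, cond_iff]
  split_ifs <;> simp only [Prod.mk.injEq] <;> omega

theorem followB_eq (ts : List (Int × Int)) (p : Int × Int) :
    followB p ts = p :: loopA p ts := by
  induction ts generalizing p with
  | nil => simp [followB, loopA]
  | cons t rest ih =>
    obtain ⟨x, y⟩ := t
    show followB p ((x, y) :: rest) = p :: loopA p ((x, y) :: rest)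
    rw [followB, loopA]
    have h := stepB_eq p (x, y)
    simp only at h
    simp only [h, ih]

-- B's table-driven head dispatch, as an if-chain A's side can be compared with
theorem movesB_getD (d : String) :
    movesB.getD d (0, 0) =
      if d = "U" then ((0 : Int), (1 : Int))
      else if d = "D" then (0, -1)
      else if d = "R" then (1, 0)
      else if d = "L" then (-1, 0)
      else (0, 0) := by
  have hmk : movesB = PySem.Dict.mk [("U", (0, 1)), ("D", (0, -1)), ("R", (1, 0)), ("L", (-1, 0))] := by
    decide
  rw [hmk, PySem.Dict.getD_eq_get?_getD]
  simp only [PySem.Dict.get?_mk_cons, beq_iff_eq]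
  by_cases h1 : d = "U" <;> by_cases h2 : d = "D" <;> by_cases h3 : d = "R" <;> by_cases h4 : d = "L" <;>
    simp_all <;>
    rw [if_neg (fun h => h1 h.symm), if_neg (fun h => h2 h.symm), if_neg (fun h => h3 h.symm),
      if_neg (fun h => h4 h.symm)]
  rfl

-- ===== VERDICT (by name: the statement is the Claim_ definition above) =====
theorem move_two_spec : Claim_equal_move_two := by
  intro knots direction _ hpre
  unfold Spec_move_two
  match knots with
  | [] => exact absurd rfl hpre
  | (x0, y0) :: rest =>
    rw [move_two_alt, move_two, followB_eq]
    simp only [movesB_getD]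
    split_ifs <;> simp [← sub_eq_add_neg]
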